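-- pv_equiv track=rewrite | github.com/FranckJoshuaMbogne/AFG_Fidelity | AFG_Fidelity.py | current_tier
-- ===== SOURCE A (Python) =====
-- from typing import Dict, Tuple, List
--
-- TIERS: Dict[str, int] = {"Palier Bronze": 100, "Palier Argent": 200, "Palier Or": 500}
--
-- def current_tier(points: int) -> Tuple[str, Tuple[str, int]]:
--     tiers_sorted = sorted(TIERS.items(), key=lambda x: x[1])
--     cur = None
--     next_t = None
--     for name, needed in tiers_sorted:
--         if points >= needed:
--             cur = name
--     for name, needed in tiers_sorted:
--         if points < needed:
--             next_t = (name, needed - points)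
--             break
--     if cur is None:
--         cur = "Aucun"
--     if next_t is None:
--         next_t = ("--", 0)
--     return cur, next_t
-- ===== SOURCE B (Python) =====
-- from bisect import bisect_right
-- from typing import Dict, Tuple
--
-- TIERS: Dict[str, int] = {"Palier Bronze": 100, "Palier Argent": 200, "Palier Or": 500}
--
-- def current_tier(points: int) -> Tuple[str, Tuple[str, int]]:
--     tiers = sorted(TIERS.items(), key=lambda t: t[1])
--     names = [n for n, _ in tiers]
--     thresholds = [v for _, v in tiers]
--     i = bisect_right(thresholds, points)
--     cur = names[i - 1] if i > 0 else "Aucun"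
--     next_t = (names[i], thresholds[i] - points) if i < len(tiers) else ("--", 0)
--     return cur, next_t
-- ===== Notes on version B (the rewrite author's own statement) =====
-- stated objective: idiomatic
-- what changed: Replaces A's two linear scans over the sorted tiers (last tier with points>=needed, first with points<needed) by one bisect_right binary search on the threshold list, indexing names/thresholds at i-1 and i.
import Mathlib
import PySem

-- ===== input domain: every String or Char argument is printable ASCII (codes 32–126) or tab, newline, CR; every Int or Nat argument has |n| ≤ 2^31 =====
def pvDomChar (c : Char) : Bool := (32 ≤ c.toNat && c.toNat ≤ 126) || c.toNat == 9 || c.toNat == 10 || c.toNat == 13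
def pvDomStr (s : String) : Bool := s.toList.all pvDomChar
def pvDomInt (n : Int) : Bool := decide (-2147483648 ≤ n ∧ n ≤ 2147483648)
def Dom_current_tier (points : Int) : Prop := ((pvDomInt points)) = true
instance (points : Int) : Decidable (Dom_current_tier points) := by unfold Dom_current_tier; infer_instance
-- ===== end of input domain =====

-- B replaces A's two linear scans over the sorted tiers with one bisect_right index lookup (idiomatic; same cost at this fixed size).

-- ===== PORT A =====
-- TIERS.items() in insertion order
def pvTIERS : List (String × Int) := [("Palier Bronze", 100), ("Palier Argent", 200), ("Palier Or", 500)]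

def current_tier (points : Int) : String × (String × Int) :=
  let tiers_sorted := PySem.List.sorted pvTIERS (fun x => x.2)
  -- first loop: cur updated whenever points >= needed
  let cur : Option String :=
    tiers_sorted.foldl (fun c nv => if points ≥ nv.2 then some nv.1 else c) none
  -- second loop with break: first entry with points < needed
  let next_t : Option (String × Int) :=
    (tiers_sorted.find? (fun nv => decide (points < nv.2))).map (fun nv => (nv.1, nv.2 - points))
  (cur.getD "Aucun", next_t.getD ("--", 0))

-- ===== PORT B =====
def current_tier_alt (points : Int) : String × (String × Int) :=
  let tiers := PySem.List.sorted pvTIERS (fun t => t.2)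
  let names := tiers.map (·.1)
  let thresholds := tiers.map (·.2)
  let i : Nat := PySem.List.bisectRight thresholds points
  let cur := if 0 < i then PySem.List.pyGetD names ((i : Int) - 1) "Aucun" else "Aucun"
  let next_t :=
    if (i : Int) < tiers.length then
      (PySem.List.pyGetD names (i : Int) "--", PySem.List.pyGetD thresholds (i : Int) 0 - points)
    else ("--", 0)
  (cur, next_t)

-- ===== PRECONDITION & SPEC =====
def Spec_current_tier (points : Int) (out : String × (String × Int)) : Prop := out = current_tier_alt points
instance (points : Int) (out : String × (String × Int)) : Decidable (Spec_current_tier points out) := by unfold Spec_current_tier; infer_instance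

-- ===== CLAIM (what is proved, stated in full; the proofs are below) =====
def Claim_equal_current_tier : Prop := ∀ (points : Int), Dom_current_tier points → Spec_current_tier points (current_tier points)

-- ===== LEMMAS AND PROOFS =====
lemma pv_sorted_eval :
    PySem.List.sorted [("Palier Bronze", (100 : Int)), ("Palier Argent", 200), ("Palier Or", 500)]
      (fun x => x.2) = [("Palier Bronze", 100), ("Palier Argent", 200), ("Palier Or", 500)] := by
  decide

lemma pv_bisect_eval (p : Int) :
    PySem.List.bisectRight [(100 : Int), 200, 500] p =
      if p < 100 then 0 else if p < 200 then 1 else if p < 500 then 2 else 3 := by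
  obtain ⟨h0, h1, h2⟩ :=
    PySem.List.bisectRight_spec [(100 : Int), 200, 500] p (by decide)
  have a0 := h1 0 (by decide)
  have a1 := h1 1 (by decide)
  have a2 := h1 2 (by decide)
  have b0 := h2 0 (by decide)
  have b1 := h2 1 (by decide)
  have b2 := h2 2 (by decide)
  simp at h0 a0 a1 a2 b0 b1 b2
  split_ifs <;> omega

-- ===== VERDICT (by name: the statement is the Claim_ definition above) =====
set_option maxHeartbeats 1000000 in
theorem current_tier_spec : Claim_equal_current_tier := by
  intro p _
  unfold Spec_current_tier current_tier current_tier_alt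
  simp only [pvTIERS, pv_sorted_eval, List.map_cons, List.map_nil, List.length_cons,
    List.length_nil]
  rcases lt_or_ge p 100 with h1 | h1
  · simp [pv_bisect_eval, List.find?, PySem.List.pyGetD, PySem.List.pyIdx?, PySem.List.pyGet?,
      h1, show ¬(100 ≤ p) by omega, show ¬(200 ≤ p) by omega, show ¬(500 ≤ p) by omega]
  · rcases lt_or_ge p 200 with h2 | h2
    · simp [pv_bisect_eval, List.find?, PySem.List.pyGetD, PySem.List.pyIdx?, PySem.List.pyGet?,
        h2, show ¬(p < 100) by omega, show 100 ≤ p from h1,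
        show ¬(200 ≤ p) by omega, show ¬(500 ≤ p) by omega]
    · rcases lt_or_ge p 500 with h3 | h3
      · simp [pv_bisect_eval, List.find?, PySem.List.pyGetD, PySem.List.pyIdx?, PySem.List.pyGet?,
          h3, show ¬(p < 100) by omega, show ¬(p < 200) by omega,
          show 100 ≤ p from h1, show 200 ≤ p from h2, show ¬(500 ≤ p) by omega]
      · simp [pv_bisect_eval, List.find?, PySem.List.pyGetD, PySem.List.pyIdx?, PySem.List.pyGet?,
          show ¬(p < 100) by omega, show ¬(p < 200) by omega, show ¬(p < 500) by omega,
          show 100 ≤ p from h1, show 200 ≤ p from h2, show 500 ≤ p from h3]
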